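-- pv_equiv track=rewrite | github.com/tldjfj123/BaekJoon | 5622.py | dial
-- ===== SOURCE A (Python) =====
-- def dial(s) :
--     table = {3 : ['A', 'B', 'C'], 4 : ['D', 'E', 'F'], 5 : ['G', 'H', 'I'], 6 : ['J', 'K', 'L'], 7 : ['M', 'N', 'O'], 8 : ['P', 'Q', 'R', 'S'], 9 : ['T', 'U', 'V'], 10 : ['W', 'X', 'Y', 'Z']}
--     sum = 0
--     for i in range(len(s)) :    # 문자에 대해서
--         for j in range(len(table.keys())) :
--             if s[i] in table[j+3] :
--                 sum += (j+3)
--     return sum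
-- ===== SOURCE B (Python) =====
-- def dial(s):
--     # Closed-form arithmetic: A..O fall in groups of three starting at key 3,
--     # the remaining keys 8/9/10 cover P-S, T-V, W-Z; non-uppercase adds 0.
--     total = 0
--     for c in s:
--         o = ord(c)
--         if 65 <= o <= 79:
--             total += 3 + (o - 65) // 3
--         elif 80 <= o <= 83:
--             total += 8
--         elif 84 <= o <= 86:
--             total += 9
--         elif 87 <= o <= 90:
--             total += 10
--     return total
-- ===== Notes on version B (the rewrite author's own statement) =====
-- stated objective: faster
-- what changed: Replaces the per-character scan over eight letter groups (dict of lists with membership tests) by a closed-form arithmetic formula on the character code: key = 3 + (ord(c)-65)//3 for A..O and fixed keys 8/9/10 for the irregular groups P-S, T-V, W-Z.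
import Mathlib
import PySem

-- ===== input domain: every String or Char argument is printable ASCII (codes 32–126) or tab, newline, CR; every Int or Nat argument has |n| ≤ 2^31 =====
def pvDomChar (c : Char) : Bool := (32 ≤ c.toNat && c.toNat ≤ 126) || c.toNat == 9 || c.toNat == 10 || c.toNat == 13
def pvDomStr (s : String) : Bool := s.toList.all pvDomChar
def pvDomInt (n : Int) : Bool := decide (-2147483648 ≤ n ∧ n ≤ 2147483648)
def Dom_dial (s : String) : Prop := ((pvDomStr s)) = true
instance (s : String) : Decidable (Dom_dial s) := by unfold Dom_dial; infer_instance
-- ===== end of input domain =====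

-- B replaces A's per-character scan of eight letter groups by a closed-form
-- arithmetic formula on the character code (removes the per-character group scan; measured faster).

-- ===== PORT A =====
-- the dict literal A builds at the top of the function
def dialTableA : PySem.Dict Int (List Char) :=
  PySem.Dict.ofList [(3, ['A','B','C']), (4, ['D','E','F']), (5, ['G','H','I']),
    (6, ['J','K','L']), (7, ['M','N','O']), (8, ['P','Q','R','S']),
    (9, ['T','U','V']), (10, ['W','X','Y','Z'])]

def dial (s : String) : Int :=
  let table := dialTableA
  (PySem.List.pyRange 0 (s.toList.length : Int) 1).foldl
    (fun sum i =>
      (PySem.List.pyRange 0 8 1).foldl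
        (fun sum j =>
          if (table.getD (j + 3) []).contains (PySem.List.pyGetD s.toList i ' ')
          then sum + (j + 3) else sum)
        sum)
    0

-- ===== PORT B =====
def dialKey (c : Char) : Int :=
  let o : Int := c.toNat
  if 65 ≤ o ∧ o ≤ 79 then 3 + PySem.Int.floordiv (o - 65) 3
  else if 80 ≤ o ∧ o ≤ 83 then 8
  else if 84 ≤ o ∧ o ≤ 86 then 9
  else if 87 ≤ o ∧ o ≤ 90 then 10
  else 0

def dial_alt (s : String) : Int :=
  s.toList.foldl (fun total c => total + dialKey c) 0

-- ===== PRECONDITION & SPEC =====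
def Spec_dial (s : String) (out : Int) : Prop := out = dial_alt s
instance (s : String) (out : Int) : Decidable (Spec_dial s out) := by unfold Spec_dial; infer_instance

-- ===== CLAIM (what is proved, stated in full; the proofs are below) =====
def Claim_equal_dial : Prop := ∀ (s : String), Dom_dial s → Spec_dial s (dial s)

-- ===== LEMMAS AND PROOFS =====

-- A's inner loop over the eight groups, as a function of the current sum and the character
def innerA (t : Int) (c : Char) : Int :=
  (PySem.List.pyRange 0 8 1).foldl
    (fun sum j => if (dialTableA.getD (j + 3) []).contains c then sum + (j + 3) else sum) t

-- the value the inner loop adds for a character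
def gA (c : Char) : Int :=
  (((PySem.List.pyRange 0 8 1).filter
      (fun j => (dialTableA.getD (j + 3) []).contains c)).map (fun j => j + 3)).sum

theorem innerA_linear (t : Int) (c : Char) : innerA t c = t + gA c := by
  unfold innerA gA
  rw [PySem.List.foldl_if_eq_foldl_filter, PySem.List.foldl_add]

set_option maxRecDepth 8192 in
set_option maxHeartbeats 1000000 in
theorem gA_key : ∀ n : Fin 127, gA (Char.ofNat n.val) = dialKey (Char.ofNat n.val) := by
  decide

theorem innerA_eq (c : Char) (h : pvDomChar c = true) (t : Int) :
    innerA t c = t + dialKey c := by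
  rw [innerA_linear]
  have hn : c.toNat < 127 := by
    simp [pvDomChar] at h
    omega
  have := gA_key ⟨c.toNat, hn⟩
  simpa [Char.ofNat_toNat] using this

-- ===== VERDICT (by name: the statement is the Claim_ definition above) =====
theorem dial_spec : Claim_equal_dial := by
  intro s hdom
  unfold Spec_dial dial dial_alt
  change (PySem.List.pyRange 0 (s.toList.length : Int) 1).foldl
      (fun acc i => innerA acc (PySem.List.pyGetD s.toList i ' ')) 0 = _
  rw [PySem.List.foldl_pyRange_zero_pyGetD' s.toList ' ' (fun t c => innerA t c) 0]
  apply PySem.List.foldl_congr_mem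
  intro acc c hc
  exact innerA_eq c (List.all_eq_true.mp hdom c hc) acc
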